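-- pv_equiv track=rewrite | github.com/TianyaoHua/LeetCodeSolutions | brackets match.py | solution
-- ===== SOURCE A (Python) =====
-- def solution(S):
--     # write your code in Python 3.6
--     n = len(S)
--     table1 = [0]*(n+1)
--     table2 = [0]*(n+1)
--     for i in range(n):
--         if S[i] == '(':
--             table1[i+1] = table1[i]+1
--         else:
--             table1[i+1] = table1[i]
--     for i in range(n-1,-1,-1):
--         if S[i] == ')':
--             table2[i] = table2[i+1]+1
--         else:
--             table2[i] = table2[i+1]
--     for k in range(n+1):
--         if table1[k] == table2[k]:
--             return k
--     return -1
-- ===== SOURCE B (Python) =====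
-- def solution(S):
--     C = S.count(')')
--     seen = 0
--     for k, c in enumerate(S):
--         if seen == C:
--             return k
--         if c in '()':
--             seen += 1
--     return len(S)
-- ===== Notes on version B (the rewrite author's own statement) =====
-- stated objective: simpler
-- what changed: Replaces the two prefix/suffix tables plus a third scan by a single pass with one scalar counter of parenthesis characters, using the identity that the two tables agree at k exactly when the number of paren chars in the first k characters equals the total number of close parens.
import Mathlib
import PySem

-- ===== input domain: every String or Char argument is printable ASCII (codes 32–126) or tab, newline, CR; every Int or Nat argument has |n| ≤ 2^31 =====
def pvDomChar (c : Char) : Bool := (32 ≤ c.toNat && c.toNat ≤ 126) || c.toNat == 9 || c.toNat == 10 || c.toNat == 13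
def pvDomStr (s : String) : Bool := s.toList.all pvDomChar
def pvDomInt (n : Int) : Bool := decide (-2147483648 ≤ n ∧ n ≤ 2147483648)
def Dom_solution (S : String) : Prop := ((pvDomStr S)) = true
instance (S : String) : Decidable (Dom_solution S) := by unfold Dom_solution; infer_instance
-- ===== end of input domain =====

-- B replaces A's two prefix/suffix tables and third scan by one pass with a single counter of paren characters; equal return value on every string (proved below); timing run measured B faster.

-- ===== PORT A =====
-- first loop: table1[i+1] = table1[i] + (S[i]=='('); list of running values starting at acc
def pvT1 (acc : Int) : List Char → List Int
  | [] => [acc]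
  | c :: cs => acc :: pvT1 (if c = '(' then acc + 1 else acc) cs

-- second loop (backwards): table2[i] = table2[i+1] + (S[i]==')')
def pvT2 : List Char → List Int
  | [] => [0]
  | c :: cs => (if c = ')' then (pvT2 cs).headI + 1 else (pvT2 cs).headI) :: pvT2 cs

-- third loop: first k with table1[k] == table2[k], else -1
def pvScanA (k : Int) : List Int → List Int → Int
  | a :: as, b :: bs => if a = b then k else pvScanA (k + 1) as bs
  | _, _ => -1

def solution (S : String) : Int :=
  pvScanA 0 (pvT1 0 S.toList) (pvT2 S.toList)

-- ===== PORT B =====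
-- for k, c in enumerate(S): if seen == C: return k; seen += c in '()'; final return len(S)
def pvGoB (C : Int) : Int → Int → List Char → Int
  | _, k, [] => k
  | seen, k, c :: cs =>
    if seen = C then k
    else pvGoB C (if c = '(' ∨ c = ')' then seen + 1 else seen) (k + 1) cs

def solution_alt (S : String) : Int :=
  let C : Int := S.toList.count ')'
  pvGoB C 0 0 S.toList

-- ===== PRECONDITION & SPEC =====
def Spec_solution (S : String) (out : Int) : Prop := out = solution_alt S
instance (S : String) (out : Int) : Decidable (Spec_solution S out) := by unfold Spec_solution; infer_instance

-- ===== CLAIM (what is proved, stated in full; the proofs are below) =====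
def Claim_equal_solution : Prop := ∀ (S : String), Dom_solution S → Spec_solution S (solution S)

-- ===== LEMMAS AND PROOFS =====

lemma pvT1_cons (a : Int) (c : Char) (cs : List Char) :
    pvT1 a (c :: cs) = a :: pvT1 (if c = '(' then a + 1 else a) cs := rfl

lemma pvT2_cons (c : Char) (cs : List Char) :
    pvT2 (c :: cs) = (if c = ')' then (pvT2 cs).headI + 1 else (pvT2 cs).headI) :: pvT2 cs := rfl

lemma pvScanA_cons (k a b : Int) (as bs : List Int) :
    pvScanA k (a :: as) (b :: bs) = if a = b then k else pvScanA (k + 1) as bs := rfl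

lemma pvGoB_cons (C seen k : Int) (c : Char) (cs : List Char) :
    pvGoB C seen k (c :: cs) =
      if seen = C then k
      else pvGoB C (if c = '(' ∨ c = ')' then seen + 1 else seen) (k + 1) cs := rfl

lemma pvT2_headI (cs : List Char) : (pvT2 cs).headI = (cs.count ')' : Int) := by
  induction cs with
  | nil => simp [pvT2]
  | cons c cs ih =>
    by_cases h : c = ')'
    · simp [pvT2, h, ih]
    · simp [pvT2, h, ih]

lemma pvCount_cons (c : Char) (cs : List Char) :
    ((c :: cs).count ')' : Int) = (cs.count ')' : Int) + (if c = ')' then 1 else 0) := by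
  by_cases h : c = ')' <;> simp [List.count_cons, h]

-- Invariant: A's scan over the two tables equals B's one-counter scan, when the
-- B counter `seen` and the A accumulator `a` are linked by seen = a + C - (closes left).
lemma pvMain (cs : List Char) : ∀ (a k C : Int), 0 ≤ a → a ≤ (cs.count ')' : Int) →
    pvScanA k (pvT1 a cs) (pvT2 cs) = pvGoB C (a + C - (cs.count ')' : Int)) k cs := by
  induction cs with
  | nil =>
    intro a k C h0 h1
    simp only [List.count_nil, Int.natCast_zero] at h1
    have ha : a = 0 := le_antisymm h1 h0
    simp [pvT1, pvT2, pvScanA, pvGoB, ha]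
  | cons c cs ih =>
    intro a k C h0 h1
    rw [pvT1_cons, pvT2_cons, pvScanA_cons, pvGoB_cons]
    have hh2 : (if c = ')' then (pvT2 cs).headI + 1 else (pvT2 cs).headI)
        = ((c :: cs).count ')' : Int) := by
      rw [pvT2_headI, pvCount_cons]
      by_cases h : c = ')' <;> simp [h]
    rw [hh2]
    by_cases hm : a = ((c :: cs).count ')' : Int)
    · rw [if_pos hm, if_pos (by omega)]
    · have hlt : a < ((c :: cs).count ')' : Int) := lt_of_le_of_ne h1 hm
      have hcnt := pvCount_cons c cs
      rw [if_neg hm, if_neg (show ¬ a + C - ((c :: cs).count ')' : Int) = C by omega)]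
      by_cases hc2 : c = ')'
      · have hc1 : ¬ c = '(' := by rw [hc2]; decide
        rw [if_neg hc1, if_pos (Or.inr hc2)]
        rw [if_pos hc2] at hcnt
        have h1' : a ≤ (cs.count ')' : Int) := by omega
        rw [ih a (k + 1) C h0 h1']
        congr 1
        omega
      · rw [if_neg hc2] at hcnt
        have h1' : a ≤ (cs.count ')' : Int) := by omega
        by_cases hc1 : c = '('
        · rw [if_pos hc1, if_pos (Or.inl hc1)]
          have h1'' : a + 1 ≤ (cs.count ')' : Int) := by omega
          rw [ih (a + 1) (k + 1) C (by omega) h1'']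
          congr 1
          omega
        · rw [if_neg hc1, if_neg (by simp [hc1, hc2])]
          rw [ih a (k + 1) C h0 h1']
          congr 1
          omega

-- ===== VERDICT (by name: the statement is the Claim_ definition above) =====
theorem solution_spec : Claim_equal_solution := by
  intro S _
  unfold Spec_solution solution solution_alt
  have := pvMain S.toList 0 0 (S.toList.count ')' : Int) le_rfl (by positivity)
  simpa using this
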